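-- pv_equiv track=rewrite | github.com/liuyubobobo/OJ-Project-Euler | 074-Digit-Fractorial-Chains_20150813.py | getResTable1
-- ===== SOURCE A (Python) =====
-- def calFacDigits( num , fac ):
--     return sum( [ fac[int(x)] for x in str(num) ] )
--
-- def getResTable1( N , fac ):
--
--     table = [0] * N
--     for i in range( 10 , N ):
--         memo = set()
--         memo.add(i)
--         num = i
--         while True:
--             nextNumber = calFacDigits( num , fac )
--             if nextNumber in memo:
--                 table[i] = len(memo)
--                 break
--             else:
--                 memo.add( nextNumber)
--             num = nextNumber
--     return table
-- ===== SOURCE B (Python) =====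
-- def getResTable1(N, fac):
--     table = [0] * N
--     lengths = {}  # value -> length of its factorial-digit-sum chain (global memo)
--     for i in range(10, N):
--         if i in lengths:
--             table[i] = lengths[i]
--             continue
--         path = []
--         seen = set()
--         v = i
--         while v not in lengths and v not in seen:
--             seen.add(v)
--             path.append(v)
--             v = sum(fac[int(c)] for c in str(v))
--         n = len(path)
--         if v in lengths:
--             p, base = n, lengths[v]
--         else:
--             p, base = path.index(v), 0
--         for j, node in enumerate(path):
--             lengths[node] = n - min(j, p) + base
--         table[i] = lengths[i]
--     return table
-- ===== Notes on version B (the rewrite author's own statement) =====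
-- stated objective: faster
-- what changed: Instead of re-walking every chain from scratch with a per-start visited set, B keeps one global memo dict mapping every value ever visited to its chain length: a new start walks only until it meets a memoized value or closes a cycle, then assigns lengths to the whole walked path at once (tail nodes get distance-to-stop plus the memoized/cycle length, cycle nodes get the cycle length).
import Mathlib
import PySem

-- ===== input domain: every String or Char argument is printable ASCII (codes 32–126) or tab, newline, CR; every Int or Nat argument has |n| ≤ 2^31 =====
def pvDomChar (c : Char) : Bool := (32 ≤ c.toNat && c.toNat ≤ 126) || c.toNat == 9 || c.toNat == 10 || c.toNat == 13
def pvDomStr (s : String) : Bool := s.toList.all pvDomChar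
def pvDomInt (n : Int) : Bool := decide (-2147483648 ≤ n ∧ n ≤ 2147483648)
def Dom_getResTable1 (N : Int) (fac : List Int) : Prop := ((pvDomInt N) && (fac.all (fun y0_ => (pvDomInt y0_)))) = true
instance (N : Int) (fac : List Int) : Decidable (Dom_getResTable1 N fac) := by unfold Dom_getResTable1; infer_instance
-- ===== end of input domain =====

-- B replaces A's per-start chain walk by a single global memo of chain lengths
-- (each value's chain length is computed once; measured faster). Return values agree on Pre_.


-- fuel for the chain walks: under Pre_ every chain value lies in [0, 10^13), so a walk
-- can make at most 10^13 + 1 steps before repeating; this fuel is proved never to run out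
def pvFuel : Nat := 10000000000002

-- ===== PORT A =====
-- fac[int(x)]: under Pre_ every char of str(num) is a decimal digit and the index is below
-- len(fac), so the getD-forms of int() and of the list index are exact there
def calFacDigits (num : Int) (fac : List Int) : Int :=
  ((PySem.Int.toChars num).map
    (fun x => PySem.List.pyGetD fac ((PySem.Int.ofChars? [x]).getD 0) 0)).sum

-- the 'while True' loop of A (fuel-driven; fuel never runs out under Pre_)
def aChainLoop (fac : List Int) : Nat → PySem.Set Int → Int → Int
  | 0, memo, _ => PySem.Set.len memo
  | fuel+1, memo, num =>
    let nextNumber := calFacDigits num fac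
    if PySem.Set.contains memo nextNumber then PySem.Set.len memo
    else aChainLoop fac fuel (PySem.Set.add memo nextNumber) nextNumber

def getResTable1 (N : Int) (fac : List Int) : List Int :=
  (PySem.List.pyRange 10 N 1).foldl
    (fun table i =>
      PySem.List.pySetD table i (aChainLoop fac pvFuel (PySem.Set.add PySem.Set.empty i) i))
    (List.replicate N.toNat 0)

-- ===== PORT B =====
-- sum(fac[int(c)] for c in str(v)) (same getD-form as in A's port, exact under Pre_)
def digitFacSum (fac : List Int) (v : Int) : Int :=
  ((PySem.Int.toChars v).map
    (fun c => PySem.List.pyGetD fac ((PySem.Int.ofChars? [c]).getD 0) 0)).sum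

-- B's inner while loop: walk until the value is memoized or repeats on the current path
def bWalk (fac : List Int) (lengths : PySem.Dict Int Int) :
    Nat → PySem.Set Int → List Int → Int → (List Int × Int)
  | 0, _, path, v => (path, v)
  | fuel+1, seen, path, v =>
    if lengths.contains v || PySem.Set.contains seen v then (path, v)
    else bWalk fac lengths fuel (PySem.Set.add seen v) (path ++ [v]) (digitFacSum fac v)

-- one iteration of B's outer for loop
def bStep (fac : List Int) (st : List Int × PySem.Dict Int Int) (i : Int) :
    List Int × PySem.Dict Int Int :=
  let table := st.1
  let lengths := st.2
  if lengths.contains i then (PySem.List.pySetD table i (lengths.getD i 0), lengths)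
  else
    let pr := bWalk fac lengths pvFuel PySem.Set.empty [] i
    let path := pr.1
    let v := pr.2
    let n : Int := PySem.List.len path
    let pb : Int × Int :=
      if lengths.contains v then (n, lengths.getD v 0)
      else (((PySem.List.index? path v).getD 0 : Nat), 0)
    let lengths' := (PySem.List.enumerate path 0).foldl
      (fun d jx => d.insert jx.2 (n - min jx.1 pb.1 + pb.2)) lengths
    (PySem.List.pySetD table i (lengths'.getD i 0), lengths')

def getResTable1_alt (N : Int) (fac : List Int) : List Int :=
  ((PySem.List.pyRange 10 N 1).foldl (bStep fac)
    (List.replicate N.toNat 0, PySem.Dict.empty)).1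

-- ===== PRECONDITION & SPEC =====
-- Pre_ excludes N > 10 with fac shorter than 10 or containing a negative entry: there a chain
-- can hit an out-of-range digit index (IndexError) or reach a negative value whose '-' character
-- makes int(x) raise ValueError (on the excluded inputs where every encountered digit index
-- happens to stay in range A still returns, and B returns the same list).
def Pre_getResTable1 (N : Int) (fac : List Int) : Prop :=
  N ≤ 10 ∨ (10 ≤ fac.length ∧ ∀ x ∈ fac, 0 ≤ x)
instance (N : Int) (fac : List Int) : Decidable (Pre_getResTable1 N fac) := by
  unfold Pre_getResTable1; infer_instance

def pvWitness_getResTable1 : Int × List Int :=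
  (11, [1, 1, 2, 6, 24, 120, 720, 5040, 40320, 362880])

def Spec_getResTable1 (N : Int) (fac : List Int) (out : List Int) : Prop :=
  out = getResTable1_alt N fac
instance (N : Int) (fac : List Int) (out : List Int) : Decidable (Spec_getResTable1 N fac out) := by
  unfold Spec_getResTable1; infer_instance

-- ===== CLAIM (what is proved, stated in full; the proofs are below) =====
def Claim_equal_getResTable1 : Prop :=
  ∀ (N : Int) (fac : List Int), Dom_getResTable1 N fac → Pre_getResTable1 N fac →
    Spec_getResTable1 N fac (getResTable1 N fac)

-- ===== LEMMAS AND PROOFS =====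

-- hypotheses extracted from Pre_ (second disjunct) and Dom
def HF (fac : List Int) : Prop :=
  10 ≤ fac.length ∧ (∀ x ∈ fac, 0 ≤ x) ∧ (∀ x ∈ fac, x ≤ 2147483648)

-- the range every chain value stays in under HF
def GoodV (v : Int) : Prop := 0 ≤ v ∧ v < 10000000000000

-- iterates of the chain-step function
def itF (fac : List Int) : Nat → Int → Int
  | 0, v => v
  | k+1, v => itF fac k (calFacDigits v fac)

-- 'the chain of v has exactly n distinct values': first n iterates distinct, n-th repeats
def OrbLen (fac : List Int) (v : Int) (n : Nat) : Prop :=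
  (∀ j k : Nat, j < k → k < n → itF fac j v ≠ itF fac k v) ∧
  (∃ j : Nat, j < n ∧ itF fac n v = itF fac j v)

-- B's dict invariant: every key is a chain value carrying its true chain length, keys closed under the step
def InvD (fac : List Int) (d : PySem.Dict Int Int) : Prop :=
  ∀ k : Int, d.contains k = true →
    GoodV k ∧ d.contains (calFacDigits k fac) = true ∧
    ∃ n : Nat, OrbLen fac k n ∧ d.getD k 0 = (n : Int)

theorem itF_succ_last (fac : List Int) (k : Nat) (v : Int) :
    itF fac (k+1) v = calFacDigits (itF fac k v) fac := by
  induction k generalizing v with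
  | zero => rfl
  | succ k ih => exact ih (calFacDigits v fac)

theorem itF_good (fac : List Int) (hGoodF : ∀ v, GoodV v → GoodV (calFacDigits v fac))
    (v : Int) (hv : GoodV v) (k : Nat) : GoodV (itF fac k v) := by
  induction k generalizing v with
  | zero => exact hv
  | succ k ih => exact ih (calFacDigits v fac) (hGoodF v hv)

theorem invD_iter (fac : List Int) (d : PySem.Dict Int Int) (hd : InvD fac d)
    (k : Int) (hk : d.contains k = true) (a : Nat) : d.contains (itF fac a k) = true := by
  induction a generalizing k with
  | zero => exact hk
  | succ a ih =>
    have h := (hd k hk).2.1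
    exact ih _ h

theorem toDigitsCore_digit (f : Nat) : ∀ (m : Nat) (ds : List Char),
    (∀ c ∈ ds, ∃ d : Nat, d < 10 ∧ c = Nat.digitChar d) →
    ∀ c ∈ Nat.toDigitsCore 10 f m ds, ∃ d : Nat, d < 10 ∧ c = Nat.digitChar d := by
  induction f with
  | zero => intro m ds h; simpa [Nat.toDigitsCore] using h
  | succ f ih =>
    intro m ds h
    simp only [Nat.toDigitsCore]
    split
    · intro c hc
      rcases List.mem_cons.mp hc with hc | hc
      · exact ⟨m % 10, Nat.mod_lt _ (by norm_num), hc⟩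
      · exact h c hc
    · apply ih
      intro c hc
      rcases List.mem_cons.mp hc with hc | hc
      · exact ⟨m % 10, Nat.mod_lt _ (by norm_num), hc⟩
      · exact h c hc

theorem ofChars_digitChar (d : Nat) (hd : d < 10) :
    (PySem.Int.ofChars? [Nat.digitChar d]).getD 0 = (d : Int) := by
  interval_cases d <;> decide

theorem calFac_good (fac : List Int) (hf : HF fac) (v : Int) (hv : GoodV v) :
    GoodV (calFacDigits v fac) := by
  obtain ⟨hlen, hnn, hub⟩ := hf
  obtain ⟨hv0, hvM⟩ := hv
  have htc : PySem.Int.toChars v = Nat.toDigits 10 v.toNat := by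
    simp [PySem.Int.toChars, not_lt.mpr hv0]
  have hmem : ∀ y ∈ (Nat.toDigits 10 v.toNat).map
      (fun x => PySem.List.pyGetD fac ((PySem.Int.ofChars? [x]).getD 0) 0),
      0 ≤ y ∧ y ≤ 2147483648 := by
    intro y hy
    obtain ⟨c, hc, rfl⟩ := List.mem_map.mp hy
    obtain ⟨d, hd10, rfl⟩ := toDigitsCore_digit _ _ _ (by simp) c hc
    rw [ofChars_digitChar d hd10]
    have hg : PySem.List.pyGetD fac ((d : Nat) : Int) 0 = fac.getD d 0 := by
      simp [PySem.List.pyGetD_natCast, List.getD]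
    rw [hg]
    have hmem2 : fac.getD d 0 ∈ fac := by
      rw [List.getD_eq_getElem fac 0 (by omega)]; exact List.getElem_mem (by omega)
    exact ⟨hnn _ hmem2, hub _ hmem2⟩
  have hlen13 : (Nat.toDigits 10 v.toNat).length ≤ 13 :=
    Nat.toDigits_length 10 v.toNat 13 (by norm_num) (by omega)
  have hsum0 : 0 ≤ ((Nat.toDigits 10 v.toNat).map
      (fun x => PySem.List.pyGetD fac ((PySem.Int.ofChars? [x]).getD 0) 0)).sum :=
    List.sum_nonneg (fun y hy => (hmem y hy).1)
  have hsumU := List.sum_le_card_nsmul ((Nat.toDigits 10 v.toNat).map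
      (fun x => PySem.List.pyGetD fac ((PySem.Int.ofChars? [x]).getD 0) 0)) 2147483648
      (fun y hy => (hmem y hy).2)
  rw [List.length_map, nsmul_eq_mul] at hsumU
  have hlc : ((Nat.toDigits 10 v.toNat).length : Int) ≤ 13 := by exact_mod_cast hlen13
  constructor
  · simpa [calFacDigits, htc] using hsum0
  · have : ((Nat.toDigits 10 v.toNat).length : Int) * 2147483648 ≤ 13 * 2147483648 := by
      nlinarith
    simp only [calFacDigits, htc]
    omega

theorem itF_add (fac : List Int) (a b : Nat) (v : Int) :
    itF fac (a + b) v = itF fac b (itF fac a v) := by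
  induction b with
  | zero => rfl
  | succ b ih => rw [show a + (b+1) = (a+b)+1 from rfl, itF_succ_last, ih, ← itF_succ_last]

theorem pigeon (fac : List Int) (v : Int) (t : Nat)
    (hd : ∀ j k : Nat, j < k → k < t → itF fac j v ≠ itF fac k v)
    (hg : ∀ k : Nat, k < t → GoodV (itF fac k v)) : t ≤ 10000000000000 := by
  have h := Finset.card_le_card_of_injOn (f := fun k => (itF fac k v).toNat)
    (s := Finset.range t) (t := Finset.range 10000000000000)
    (by
      intro k hk
      have hk' : k < t := by simpa using hk
      have := hg k hk'
      unfold GoodV at this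
      refine Finset.mem_range.mpr ?_
      change (itF fac k v).toNat < 10000000000000
      omega)
    (by
      intro a ha b hb hab
      have ha : a < t := by simpa using ha
      have hb : b < t := by simpa using hb
      have hab : (itF fac a v).toNat = (itF fac b v).toNat := hab
      by_contra hne
      rcases Nat.lt_or_ge a b with h' | h'
      · have := hd a b h' hb
        have ga := hg a ha; have gb := hg b hb
        unfold GoodV at ga gb
        apply this; omega
      · have hba : b < a := by omega
        have := hd b a hba ha
        have ga := hg a ha; have gb := hg b hb
        unfold GoodV at ga gb
        apply this; omega)
  simpa using h

theorem orb_unique (fac : List Int) (v : Int) (n m : Nat)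
    (hn : OrbLen fac v n) (hm : OrbLen fac v m) : n = m := by
  by_contra hne
  rcases Nat.lt_or_ge n m with h | h
  · obtain ⟨j, hj, he⟩ := hn.2
    exact hm.1 j n (by omega) h he.symm
  · have h : m < n := by omega
    obtain ⟨j, hj, he⟩ := hm.2
    exact hn.1 j m (by omega) h he.symm

theorem aLoop_spec (fac : List Int) (hGoodF : ∀ v, GoodV v → GoodV (calFacDigits v fac))
    (i : Int) (hi : GoodV i) :
    ∀ fuel t : Nat, 1 ≤ t → 10000000000002 ≤ fuel + t →
    (∀ j k : Nat, j < k → k < t → itF fac j i ≠ itF fac k i) →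
    ∃ n : Nat, OrbLen fac i n ∧
      aChainLoop fac fuel ((List.range t).map (fun k => itF fac k i)) (itF fac (t-1) i) = (n : Int) := by
  intro fuel
  induction fuel with
  | zero =>
    intro t ht hfuel hdist
    have := pigeon fac i t hdist (fun k hk => itF_good fac hGoodF i hi k)
    omega
  | succ fuel ih =>
    intro t ht hfuel hdist
    have hnext : calFacDigits (itF fac (t-1) i) fac = itF fac t i := by
      rw [← itF_succ_last]; congr 1; omega
    by_cases hmem : itF fac t i ∈ (List.range t).map (fun k => itF fac k i)
    · obtain ⟨k, hk, he⟩ := List.mem_map.mp hmem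
      refine ⟨t, ⟨hdist, ⟨k, List.mem_range.mp hk, he.symm⟩⟩, ?_⟩
      simp only [aChainLoop, hnext]
      rw [if_pos (by simp only [PySem.Set.contains]; simpa using hmem)]
      simp [PySem.Set.len]
    · have hdist' : ∀ j k : Nat, j < k → k < t + 1 → itF fac j i ≠ itF fac k i := by
        intro j k hjk hk
        rcases Nat.lt_or_ge k t with h | h
        · exact hdist j k hjk h
        · have hk : k = t := by omega
          subst hk
          intro he
          exact hmem (List.mem_map.mpr ⟨j, List.mem_range.mpr hjk, he⟩)
      have hcont : PySem.Set.contains ((List.range t).map (fun k => itF fac k i)) (itF fac t i) = false := by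
        simp only [PySem.Set.contains]
        rw [List.contains_eq_mem]
        simpa using hmem
      obtain ⟨n, horb, heq⟩ := ih (t+1) (by omega) (by omega) hdist'
      refine ⟨n, horb, ?_⟩
      have hadd : PySem.Set.add ((List.range t).map (fun k => itF fac k i)) (itF fac t i)
          = (List.range (t+1)).map (fun k => itF fac k i) := by
        simp only [PySem.Set.add, hcont, Bool.false_eq_true, if_false]
        rw [List.range_succ, List.map_append]; rfl
      simp only [aChainLoop, hnext]
      rw [if_neg (by rw [hcont]; exact Bool.false_ne_true), hadd]
      simpa using heq

theorem dictFold_contains (d : PySem.Dict Int Int) (path : List Int) (f : Int → Int) (s : Int) (x : Int) :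
    (((PySem.List.enumerate path s).foldl (fun d jx => d.insert jx.2 (f jx.1)) d).contains x = true)
      ↔ (d.contains x = true ∨ x ∈ path) := by
  induction path generalizing d s with
  | nil => simp [PySem.List.enumerate]
  | cons y ys ih =>
    rw [PySem.List.enumerate_cons]
    simp only [List.foldl_cons, List.mem_cons]
    rw [ih]
    rw [PySem.Dict.contains_insert]
    constructor
    · rintro (h | h)
      · rcases Bool.or_eq_true_iff.mp h with h | h  -- hope name
        · exact Or.inr (Or.inl (by simpa using h))
        · exact Or.inl h
      · exact Or.inr (Or.inr h)
    · rintro (h | h | h)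
      · exact Or.inl (by simp [h])
      · subst h; exact Or.inl (by simp)
      · exact Or.inr h

theorem dictFold_getD (d : PySem.Dict Int Int) (path : List Int) (f : Int → Int) (s : Int) (x : Int)
    (hx : x ∉ path) :
    ((PySem.List.enumerate path s).foldl (fun d jx => d.insert jx.2 (f jx.1)) d).getD x 0
      = d.getD x 0 := by
  induction path generalizing d s with
  | nil => simp [PySem.List.enumerate]
  | cons y ys ih =>
    rw [PySem.List.enumerate_cons]
    simp only [List.foldl_cons]
    rw [ih _ _ (fun h => hx (List.mem_cons.mpr (Or.inr h)))]
    exact PySem.Dict.getD_insert_of_ne _ _ _ (fun h => hx (by simp [h]))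

theorem dictFold_getD_mem (d : PySem.Dict Int Int) (path : List Int) (f : Int → Int) (s : Int)
    (hnd : path.Nodup) (j : Nat) (hj : j < path.length) :
    ((PySem.List.enumerate path s).foldl (fun d jx => d.insert jx.2 (f jx.1)) d).getD path[j] 0
      = f (s + j) := by
  induction path generalizing d s j with
  | nil => simp at hj
  | cons y ys ih =>
    rw [PySem.List.enumerate_cons]
    simp only [List.foldl_cons]
    cases j with
    | zero =>
      simp only [List.getElem_cons_zero]
      rw [dictFold_getD _ _ _ _ _ (List.nodup_cons.mp hnd).1]
      rw [PySem.Dict.getD_insert_self]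
      simp
    | succ j =>
      simp only [List.getElem_cons_succ]
      rw [ih _ _ (List.nodup_cons.mp hnd).2 j (by simpa using hj)]
      congr 1
      push_cast
      ring

theorem bWalk_spec (fac : List Int) (hGoodF : ∀ v, GoodV v → GoodV (calFacDigits v fac))
    (d : PySem.Dict Int Int) (i : Int) (hi : GoodV i) :
    ∀ fuel t : Nat, 10000000000002 ≤ fuel + t →
    (∀ j k : Nat, j < k → k < t → itF fac j i ≠ itF fac k i) →
    (∀ j : Nat, j < t → d.contains (itF fac j i) = false) →
    ∃ t' : Nat, t ≤ t' ∧
      bWalk fac d fuel ((List.range t).map (fun k => itF fac k i))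
        ((List.range t).map (fun k => itF fac k i)) (itF fac t i)
        = ((List.range t').map (fun k => itF fac k i), itF fac t' i) ∧
      (∀ j k : Nat, j < k → k < t' → itF fac j i ≠ itF fac k i) ∧
      (∀ j : Nat, j < t' → d.contains (itF fac j i) = false) ∧
      (d.contains (itF fac t' i) = true ∨ ∃ p : Nat, p < t' ∧ itF fac t' i = itF fac p i) := by
  intro fuel
  induction fuel with
  | zero =>
    intro t hfuel hdist hnotin
    have := pigeon fac i t hdist (fun k _ => itF_good fac hGoodF i hi k)
    omega
  | succ fuel ih =>
    intro t hfuel hdist hnotin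
    by_cases hcd : d.contains (itF fac t i) = true
    · refine ⟨t, le_rfl, ?_, hdist, hnotin, Or.inl hcd⟩
      simp only [bWalk]
      rw [if_pos (by rw [hcd]; rfl)]
    · by_cases hmem : itF fac t i ∈ (List.range t).map (fun k => itF fac k i)
      · obtain ⟨k, hk, he⟩ := List.mem_map.mp hmem
        refine ⟨t, le_rfl, ?_, hdist, hnotin, Or.inr ⟨k, List.mem_range.mp hk, he.symm⟩⟩
        simp only [bWalk]
        rw [if_pos]
        simp only [PySem.Set.contains, Bool.or_eq_true]
        exact Or.inr (by rw [List.contains_eq_mem]; simpa using hmem)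
      · have hcont : PySem.Set.contains ((List.range t).map (fun k => itF fac k i)) (itF fac t i) = false := by
          simp only [PySem.Set.contains]
          rw [List.contains_eq_mem]
          simpa using hmem
        have hdist' : ∀ j k : Nat, j < k → k < t + 1 → itF fac j i ≠ itF fac k i := by
          intro j k hjk hk
          rcases Nat.lt_or_ge k t with h | h
          · exact hdist j k hjk h
          · have hk : k = t := by omega
            subst hk
            intro he
            exact hmem (List.mem_map.mpr ⟨j, List.mem_range.mpr hjk, he⟩)
        have hnotin' : ∀ j : Nat, j < t + 1 → d.contains (itF fac j i) = false := by
          intro j hj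
          rcases Nat.lt_or_ge j t with h | h
          · exact hnotin j h
          · have : j = t := by omega
            subst this
            exact Bool.not_eq_true _ ▸ (by simpa using hcd)
        have hadd : PySem.Set.add ((List.range t).map (fun k => itF fac k i)) (itF fac t i)
            = (List.range (t+1)).map (fun k => itF fac k i) := by
          simp only [PySem.Set.add, hcont, Bool.false_eq_true, if_false]
          rw [List.range_succ, List.map_append]; rfl
        have happ : ((List.range t).map (fun k => itF fac k i)) ++ [itF fac t i]
            = (List.range (t+1)).map (fun k => itF fac k i) := by
          rw [List.range_succ, List.map_append]; rfl
        have hnextv : digitFacSum fac (itF fac t i) = itF fac (t+1) i := by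
          rw [itF_succ_last]; rfl
        obtain ⟨t', ht', heq, hd', hn', hstop⟩ := ih (t+1) (by omega) hdist' hnotin'
        refine ⟨t', by omega, ?_, hd', hn', hstop⟩
        simp only [bWalk]
        rw [if_neg (by
          intro h
          rcases Bool.or_eq_true_iff.mp h with h | h
          · exact hcd h
          · rw [hcont] at h; exact Bool.false_ne_true h), hadd, happ, hnextv]
        exact heq

theorem mod_ne_mod (q a c m : Nat) (hac : a < c) (hc : c < m) : (q+a) % m ≠ (q+c) % m := by
  intro h
  have hmod : (q+a) ≡ (q+c) [MOD m] := h
  have hdvd : m ∣ (q+c) - (q+a) := (Nat.modEq_iff_dvd' (by omega)).mp hmod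
  have := Nat.le_of_dvd (by omega) hdvd
  omega

theorem itF_reduce (fac : List Int) (i : Int) (p t' : Nat) (hp : p < t')
    (hrep : itF fac t' i = itF fac p i) :
    ∀ k : Nat, p ≤ k → itF fac k i = itF fac (p + (k - p) % (t' - p)) i := by
  intro k
  induction k using Nat.strong_induction_on with
  | _ k ih =>
    intro hk
    rcases Nat.lt_or_ge k t' with h | h
    · rw [Nat.mod_eq_of_lt (by omega)]
      congr 1
      omega
    · have ha : k = t' + (k - t') := by omega
      have h1 : itF fac k i = itF fac (k - (t' - p)) i := by
        rw [ha, itF_add, hrep, ← itF_add]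
        congr 1
        omega
      rw [h1, ih (k - (t' - p)) (by omega) (by omega)]
      congr 1
      rw [show k - p = (k - (t' - p) - p) + (t' - p) by omega, Nat.add_mod_right]

theorem orb_of_tail_cycle (fac : List Int) (i : Int) (t' p : Nat) (hp : p < t')
    (hdist : ∀ a c : Nat, a < c → c < t' → itF fac a i ≠ itF fac c i)
    (hrep : itF fac t' i = itF fac p i) (j : Nat) (hj : j < t') :
    OrbLen fac (itF fac j i) (t' - min j p) := by
  rcases Nat.lt_or_ge j (p+1) with hjp | hjp
  · have hjp : j ≤ p := by omega
    rw [min_eq_left hjp]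
    constructor
    · intro a c hac hc
      rw [← itF_add, ← itF_add]
      exact hdist (j+a) (j+c) (by omega) (by omega)
    · refine ⟨p - j, by omega, ?_⟩
      rw [← itF_add, ← itF_add, show j + (t' - j) = t' by omega, show j + (p - j) = p by omega]
      exact hrep
  · have hjp : p < j := by omega
    rw [min_eq_right (by omega)]
    have hred := itF_reduce fac i p t' hp hrep
    constructor
    · intro a c hac hc
      rw [← itF_add, ← itF_add]
      rw [hred (j+a) (by omega), hred (j+c) (by omega)]
      have e1 : j + a - p = (j - p) + a := by omega
      have e2 : j + c - p = (j - p) + c := by omega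
      rw [e1, e2]
      have hne := mod_ne_mod (j - p) a c (t' - p) hac hc
      rcases Nat.lt_or_ge (((j-p) + a) % (t'-p)) (((j-p) + c) % (t'-p)) with h | h
      · exact hdist _ _ (by omega) (by
          have := Nat.mod_lt ((j-p) + c) (y := t'-p) (by omega)
          omega)
      · have hlt : (((j-p) + c) % (t'-p)) < (((j-p) + a) % (t'-p)) := by omega
        exact fun he => (hdist _ _ (by omega) (by
          have := Nat.mod_lt ((j-p) + a) (y := t'-p) (by omega)
          omega)) he.symm
    · refine ⟨0, by omega, ?_⟩
      rw [← itF_add]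
      rw [hred (j + (t' - p)) (by omega)]
      have : j + (t' - p) - p = (j - p) + (t' - p) := by omega
      rw [this, Nat.add_mod_right, Nat.mod_eq_of_lt (by omega)]
      show itF fac (p + (j - p)) i = itF fac j i
      congr 1
      omega

theorem orb_append (fac : List Int) (i : Int) (t' b : Nat) (j : Nat) (hj : j < t')
    (hdist : ∀ a c : Nat, a < c → c < t' → itF fac a i ≠ itF fac c i)
    (horb : OrbLen fac (itF fac t' i) b)
    (hsep : ∀ a : Nat, a < t' → ∀ c : Nat, itF fac a i ≠ itF fac c (itF fac t' i)) :
    OrbLen fac (itF fac j i) (t' - j + b) := by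
  constructor
  · intro a c hac hc
    rcases Nat.lt_or_ge c (t' - j) with hcs | hcs
    · rw [← itF_add, ← itF_add]
      exact hdist (j+a) (j+c) (by omega) (by omega)
    · rcases Nat.lt_or_ge a (t' - j) with has | has
      · rw [← itF_add]
        have : itF fac c (itF fac j i) = itF fac (c - (t' - j)) (itF fac t' i) := by
          rw [← itF_add, ← itF_add]
          congr 1
          omega
        rw [this]
        exact hsep (j+a) (by omega) _
      · have h1 : itF fac a (itF fac j i) = itF fac (a - (t' - j)) (itF fac t' i) := by
          rw [← itF_add, ← itF_add]; congr 1; omega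
        have h2 : itF fac c (itF fac j i) = itF fac (c - (t' - j)) (itF fac t' i) := by
          rw [← itF_add, ← itF_add]; congr 1; omega
        rw [h1, h2]
        exact horb.1 _ _ (by omega) (by omega)
  · obtain ⟨q, hq, hqe⟩ := horb.2
    refine ⟨t' - j + q, by omega, ?_⟩
    have h1 : itF fac (t' - j + b) (itF fac j i) = itF fac b (itF fac t' i) := by
      rw [← itF_add, ← itF_add]; congr 1; omega
    have h2 : itF fac (t' - j + q) (itF fac j i) = itF fac q (itF fac t' i) := by
      rw [← itF_add, ← itF_add]; congr 1; omega
    rw [h1, h2, hqe]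

theorem bStep_spec (fac : List Int) (hGoodF : ∀ v, GoodV v → GoodV (calFacDigits v fac))
    (d : PySem.Dict Int Int) (hd : InvD fac d) (table : List Int) (i : Int) (hi : GoodV i) :
    ∃ n : Nat, OrbLen fac i n ∧
      (bStep fac (table, d) i).1 = PySem.List.pySetD table i (n : Int) ∧
      InvD fac (bStep fac (table, d) i).2 := by
  by_cases hci : d.contains i = true
  · obtain ⟨hgood, hclose, n, horb, hget⟩ := hd i hci
    refine ⟨n, horb, ?_, ?_⟩
    · simp only [bStep, hci, if_true]
      rw [hget]
    · simp only [bStep, hci, if_true]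
      exact hd
  · have hcif : d.contains i = false := by simpa using hci
    obtain ⟨t', ht0, heq, hdist, hnotin, hstop⟩ :=
      bWalk_spec fac hGoodF d i hi pvFuel 0 (by simp [pvFuel])
        (by intro j k _ hk; omega)
        (by intro j hj; omega)
    have heq' : bWalk fac d pvFuel PySem.Set.empty [] i
        = ((List.range t').map (fun k => itF fac k i), itF fac t' i) := by
      have h0 : (List.range 0).map (fun k => itF fac k i) = ([] : List Int) := by simp
      have h1 : itF fac 0 i = i := rfl
      rw [h0, h1] at heq
      exact heq
    have ht1 : 1 ≤ t' := by
      rcases hstop with h | ⟨p, hp, _⟩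
      · by_contra h0
        have : t' = 0 := by omega
        subst this
        rw [show itF fac 0 i = i from rfl] at h
        rw [hcif] at h
        exact Bool.false_ne_true h
      · omega
    have hlenpath : ((List.range t').map (fun k => itF fac k i)).length = t' := by simp
    have hgetpath : ∀ (j : Nat) (hj : j < t'),
        ((List.range t').map (fun k => itF fac k i))[j]'(by rw [hlenpath]; exact hj) = itF fac j i := by
      intro j hj
      simp
    have hnd : ((List.range t').map (fun k => itF fac k i)).Nodup := by
      refine List.Nodup.map_on ?_ List.nodup_range
      intro a ha b hb hab
      by_contra hne
      rcases Nat.lt_or_ge a b with h | h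
      · exact hdist a b h (List.mem_range.mp hb) hab
      · exact hdist b a (by omega) (List.mem_range.mp ha) hab.symm
    have hmem_path : ∀ x, x ∈ (List.range t').map (fun k => itF fac k i) ↔ ∃ a, a < t' ∧ itF fac a i = x := by
      intro x
      simp [List.mem_map, List.mem_range]
    have hnlen : PySem.List.len ((List.range t').map (fun k => itF fac k i)) = (t' : Int) := by
      simp [PySem.List.len]
    -- the two sub-cases
    by_cases hcv : d.contains (itF fac t' i) = true
    · -- walk stopped on a memoized value
      obtain ⟨hgoodv, hclosev, b, horbv, hgetv⟩ := hd (itF fac t' i) hcv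
      have hsep : ∀ a : Nat, a < t' → ∀ c : Nat, itF fac a i ≠ itF fac c (itF fac t' i) := by
        intro a ha c he
        have h1 : d.contains (itF fac c (itF fac t' i)) = true := invD_iter fac d hd _ hcv c
        rw [← he] at h1
        rw [hnotin a ha] at h1
        exact Bool.false_ne_true h1
      have horbj : ∀ j : Nat, j < t' → OrbLen fac (itF fac j i) (t' - j + b) := by
        intro j hj
        exact orb_append fac i t' b j hj hdist horbv hsep
      -- reduce bStep
      have hred : bStep fac (table, d) i =
          (PySem.List.pySetD table i
            ((((PySem.List.enumerate ((List.range t').map (fun k => itF fac k i)) 0).foldl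
              (fun d jx => d.insert jx.2 ((t' : Int) - min jx.1 (t' : Int) + (b : Int))) d)).getD i 0),
           ((PySem.List.enumerate ((List.range t').map (fun k => itF fac k i)) 0).foldl
              (fun d jx => d.insert jx.2 ((t' : Int) - min jx.1 (t' : Int) + (b : Int))) d)) := by
        simp only [bStep, hcif, Bool.false_eq_true, if_false, heq', hnlen, hcv, if_true, hgetv]
      -- value of the new dict at a path element
      have hvalmem : ∀ (a : Nat) (ha : a < t'),
          (((PySem.List.enumerate ((List.range t').map (fun k => itF fac k i)) 0).foldl
            (fun d jx => d.insert jx.2 ((t' : Int) - min jx.1 (t' : Int) + (b : Int))) d)).getD (itF fac a i) 0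
          = ((t' - a + b : Nat) : Int) := by
        intro a ha
        rw [show itF fac a i = ((List.range t').map (fun k => itF fac k i))[a]'(by rw [hlenpath]; exact ha)
            from (hgetpath a ha).symm]
        rw [dictFold_getD_mem d _ (fun z => (t' : Int) - min z (t' : Int) + (b : Int)) 0 hnd a (by rw [hlenpath]; exact ha)]
        omega
      have hcont' : ∀ x : Int,
          ((((PySem.List.enumerate ((List.range t').map (fun k => itF fac k i)) 0).foldl
            (fun d jx => d.insert jx.2 ((t' : Int) - min jx.1 (t' : Int) + (b : Int))) d)).contains x = true)
          ↔ (d.contains x = true ∨ x ∈ (List.range t').map (fun k => itF fac k i)) :=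
        fun x => dictFold_contains d _ (fun z => (t' : Int) - min z (t' : Int) + (b : Int)) 0 x
      refine ⟨t' + b, ?_, ?_, ?_⟩
      · have := horbj 0 (by omega)
        simpa using this
      · rw [hred]
        have h0 := hvalmem 0 (by omega)
        rw [show itF fac 0 i = i from rfl] at h0
        rw [h0, show t' - 0 + b = t' + b from by omega]
      · rw [hred]
        intro x hx
        rcases (hcont' x).mp hx with hold | hpm
        · have hxnp : x ∉ (List.range t').map (fun k => itF fac k i) := by
            intro hm
            obtain ⟨a, ha, hax⟩ := (hmem_path x).mp hm
            rw [← hax] at hold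
            rw [hnotin a ha] at hold
            exact Bool.false_ne_true hold
          obtain ⟨hg, hc, m, ho, hv⟩ := hd x hold
          refine ⟨hg, (hcont' _).mpr (Or.inl hc), m, ho, ?_⟩
          rw [dictFold_getD d _ (fun z => (t' : Int) - min z (t' : Int) + (b : Int)) 0 x hxnp]
          exact hv
        · obtain ⟨a, ha, hax⟩ := (hmem_path x).mp hpm
          subst hax
          refine ⟨itF_good fac hGoodF i hi a, ?_, ?_⟩
          · rw [← itF_succ_last]
            rcases Nat.lt_or_ge (a+1) t' with h1 | h1
            · exact (hcont' _).mpr (Or.inr ((hmem_path _).mpr ⟨a+1, h1, rfl⟩))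
            · have : a + 1 = t' := by omega
              rw [this]
              exact (hcont' _).mpr (Or.inl hcv)
          · exact ⟨t' - a + b, horbj a ha, hvalmem a ha⟩
    · -- walk closed a cycle on its own path
      have hcvf : d.contains (itF fac t' i) = false := by simpa using hcv
      have hpex : ∃ p : Nat, p < t' ∧ itF fac t' i = itF fac p i := by
        rcases hstop with h | h
        · rw [hcvf] at h; exact absurd h Bool.false_ne_true
        · exact h
      obtain ⟨p, hp, hrep⟩ := hpex
      have hidx : PySem.List.index? ((List.range t').map (fun k => itF fac k i)) (itF fac t' i) = some p := by
        simp only [PySem.List.index?]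
        rw [List.idxOf?_eq_some_iff]
        refine ⟨by rw [hlenpath]; exact hp, by rw [hgetpath p hp]; exact hrep.symm, ?_⟩
        intro j hj
        rw [hgetpath j (by omega)]
        intro he
        exact hdist j p hj hp (by rw [he, hrep])
      have horbj : ∀ j : Nat, j < t' → OrbLen fac (itF fac j i) (t' - min j p) :=
        orb_of_tail_cycle fac i t' p hp hdist hrep
      have hred : bStep fac (table, d) i =
          (PySem.List.pySetD table i
            ((((PySem.List.enumerate ((List.range t').map (fun k => itF fac k i)) 0).foldl
              (fun d jx => d.insert jx.2 ((t' : Int) - min jx.1 ((p : Nat) : Int) + (0 : Int))) d)).getD i 0),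
           ((PySem.List.enumerate ((List.range t').map (fun k => itF fac k i)) 0).foldl
              (fun d jx => d.insert jx.2 ((t' : Int) - min jx.1 ((p : Nat) : Int) + (0 : Int))) d)) := by
        simp only [bStep, hcif, Bool.false_eq_true, if_false, heq', hnlen, hcvf, hidx, Option.getD_some]
      have hvalmem : ∀ (a : Nat) (ha : a < t'),
          (((PySem.List.enumerate ((List.range t').map (fun k => itF fac k i)) 0).foldl
            (fun d jx => d.insert jx.2 ((t' : Int) - min jx.1 ((p : Nat) : Int) + (0 : Int))) d)).getD (itF fac a i) 0
          = ((t' - min a p : Nat) : Int) := by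
        intro a ha
        rw [show itF fac a i = ((List.range t').map (fun k => itF fac k i))[a]'(by rw [hlenpath]; exact ha)
            from (hgetpath a ha).symm]
        rw [dictFold_getD_mem d _ (fun z => (t' : Int) - min z ((p : Nat) : Int) + (0 : Int)) 0 hnd a (by rw [hlenpath]; exact ha)]
        omega
      have hcont' : ∀ x : Int,
          ((((PySem.List.enumerate ((List.range t').map (fun k => itF fac k i)) 0).foldl
            (fun d jx => d.insert jx.2 ((t' : Int) - min jx.1 ((p : Nat) : Int) + (0 : Int))) d)).contains x = true)
          ↔ (d.contains x = true ∨ x ∈ (List.range t').map (fun k => itF fac k i)) :=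
        fun x => dictFold_contains d _ (fun z => (t' : Int) - min z ((p : Nat) : Int) + (0 : Int)) 0 x
      refine ⟨t', ⟨hdist, ⟨p, hp, hrep⟩⟩, ?_, ?_⟩
      · rw [hred]
        have h0 := hvalmem 0 (by omega)
        rw [show itF fac 0 i = i from rfl] at h0
        rw [h0, show t' - min 0 p = t' from by omega]
      · rw [hred]
        intro x hx
        rcases (hcont' x).mp hx with hold | hpm
        · have hxnp : x ∉ (List.range t').map (fun k => itF fac k i) := by
            intro hm
            obtain ⟨a, ha, hax⟩ := (hmem_path x).mp hm
            rw [← hax] at hold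
            rw [hnotin a ha] at hold
            exact Bool.false_ne_true hold
          obtain ⟨hg, hc, m, ho, hv⟩ := hd x hold
          refine ⟨hg, (hcont' _).mpr (Or.inl hc), m, ho, ?_⟩
          rw [dictFold_getD d _ (fun z => (t' : Int) - min z ((p : Nat) : Int) + (0 : Int)) 0 x hxnp]
          exact hv
        · obtain ⟨a, ha, hax⟩ := (hmem_path x).mp hpm
          subst hax
          refine ⟨itF_good fac hGoodF i hi a, ?_, ?_⟩
          · rw [← itF_succ_last]
            rcases Nat.lt_or_ge (a+1) t' with h1 | h1
            · exact (hcont' _).mpr (Or.inr ((hmem_path _).mpr ⟨a+1, h1, rfl⟩))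
            · have he : a + 1 = t' := by omega
              rw [he, hrep]
              exact (hcont' _).mpr (Or.inr ((hmem_path _).mpr ⟨p, hp, rfl⟩))
          · exact ⟨t' - min a p, horbj a ha, hvalmem a ha⟩


-- the combined fold: A's table and B's table stay equal
theorem main_fold (fac : List Int) (hGoodF : ∀ v, GoodV v → GoodV (calFacDigits v fac)) :
    ∀ (l : List Int) (table : List Int) (d : PySem.Dict Int Int), InvD fac d →
    (∀ i ∈ l, GoodV i) →
    l.foldl (fun table i =>
        PySem.List.pySetD table i (aChainLoop fac pvFuel (PySem.Set.add PySem.Set.empty i) i)) table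
      = (l.foldl (bStep fac) (table, d)).1 := by
  intro l
  induction l with
  | nil => intro table d _ _; rfl
  | cons i l ih =>
    intro table d hd hGood
    have hiG : GoodV i := hGood i (List.mem_cons_self)
    obtain ⟨nA, horbA, heqA⟩ := aLoop_spec fac hGoodF i hiG pvFuel 1 le_rfl (by simp [pvFuel])
      (by intro j k _ hk; omega)
    obtain ⟨nB, horbB, h1, h2⟩ := bStep_spec fac hGoodF d hd table i hiG
    have hAB : nA = nB := orb_unique fac i nA nB horbA horbB
    have heqA' : aChainLoop fac pvFuel (PySem.Set.add PySem.Set.empty i) i = (nA : Int) := by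
      have hm : (List.range 1).map (fun k => itF fac k i) = PySem.Set.add PySem.Set.empty i := by rfl
      rw [← hm]
      exact heqA
    simp only [List.foldl_cons]
    rw [heqA', hAB]
    rw [ih (PySem.List.pySetD table i (nB : Int)) (bStep fac (table, d) i).2 h2
      (fun x hx => hGood x (List.mem_cons_of_mem _ hx))]
    congr 1
    rw [← h1]

-- ===== VERDICT (by name: the statement is the Claim_ definition above) =====
theorem getResTable1_spec : Claim_equal_getResTable1 := by
  intro N fac hdom hpre
  unfold Spec_getResTable1
  rcases hpre with hN | ⟨hlen, hnn⟩
  · unfold getResTable1 getResTable1_alt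
    rw [PySem.List.pyRange_one_eq_nil hN]
    rfl
  · have hdom' := hdom
    unfold Dom_getResTable1 at hdom'
    rw [Bool.and_eq_true] at hdom'
    have hN : N ≤ 2147483648 := by
      have := hdom'.1
      simp [pvDomInt] at this
      omega
    have hub : ∀ x ∈ fac, x ≤ 2147483648 := by
      intro x hx
      have := List.all_eq_true.mp hdom'.2 x hx
      simp [pvDomInt] at this
      omega
    have hGoodF : ∀ v, GoodV v → GoodV (calFacDigits v fac) :=
      calFac_good fac ⟨hlen, hnn, hub⟩
    unfold getResTable1 getResTable1_alt
    apply main_fold fac hGoodF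
    · intro k hk
      rw [PySem.Dict.contains_empty] at hk
      exact absurd hk Bool.false_ne_true
    · intro x hx
      have := PySem.List.mem_pyRange_one.mp hx
      constructor <;> omega
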